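-- pv_equiv track=rewrite | github.com/AKleriX/codewars-tasks | Stepping Stones Puzzle/task-solution.py | first_impossible
-- ===== SOURCE A (Python) =====
-- def first_impossible(stones):
--     from collections import defaultdict
--     grid = {tuple(p): 1 for p in stones}
--     dirs = [(dx, dy) for dx in (-1, 0, 1) for dy in (-1, 0, 1) if dx or dy]
--     def neigh(c):
--         x, y = c
--         for dx, dy in dirs:
--             yield x + dx, y + dy
--     sums = defaultdict(int)
--     for c in grid:
--         for q in neigh(c):
--             if q not in grid:
--                 sums[q] += 1
--     def place(c, v, g, s):
--         g[c] = v
--         s.pop(c, None)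
--         for q in neigh(c):
--             if q not in g:
--                 s[q] += v
--     def search(v, g, s):
--         cands = [c for c, t in s.items() if t == v]
--         if not cands:
--             return v
--         best = v
--         for c in sorted(cands):
--             ng, ns = g.copy(), s.copy()
--             place(c, v, ng, ns)
--             best = max(best, search(v + 1, ng, ns))
--         return best
--     return search(2, grid, sums)
-- ===== SOURCE B (Python) =====
-- def first_impossible(stones):
--     dirs = [(dx, dy) for dx in (-1, 0, 1) for dy in (-1, 0, 1) if dx or dy]
--
--     def nsum(g, q):
--         x, y = q
--         return sum(g.get((x + dx, y + dy), 0) for dx, dy in dirs)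
--
--     def search(v, g):
--         cands = sorted(
--             q
--             for q in {(x + dx, y + dy) for (x, y) in g for (dx, dy) in dirs}
--             if q not in g and nsum(g, q) == v
--         )
--         if not cands:
--             return v
--         best = v
--         for c in cands:
--             best = max(best, search(v + 1, {**g, c: v}))
--         return best
--
--     return search(2, {tuple(p): 1 for p in stones})
-- ===== Notes on version B (the rewrite author's own statement) =====
-- stated objective: alternative
-- what changed: B drops A's incrementally maintained neighbour-sum defaultdict and the place() mutator: it recurses on the grid alone, recomputing each level's candidate cells (empty neighbours of the grid whose neighbour sum equals v) directly from the grid, and extends the grid functionally instead of copying and patching two dicts.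
import Mathlib
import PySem

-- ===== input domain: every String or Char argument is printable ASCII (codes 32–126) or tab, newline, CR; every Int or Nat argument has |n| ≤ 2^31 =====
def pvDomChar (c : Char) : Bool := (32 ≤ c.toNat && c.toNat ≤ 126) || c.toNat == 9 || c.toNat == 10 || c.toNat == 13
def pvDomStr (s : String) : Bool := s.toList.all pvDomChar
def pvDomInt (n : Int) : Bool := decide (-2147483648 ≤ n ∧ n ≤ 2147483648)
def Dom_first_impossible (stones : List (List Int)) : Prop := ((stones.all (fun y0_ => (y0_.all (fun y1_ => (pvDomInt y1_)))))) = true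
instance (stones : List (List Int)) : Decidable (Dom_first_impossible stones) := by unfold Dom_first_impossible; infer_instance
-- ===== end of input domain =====

-- B recurses on the grid alone, recomputing candidates from it each level instead of
-- maintaining A's neighbour-sum defaultdict with place(); objective: alternative decomposition.
-- Both ports carry a fuel counter bounding the recursion depth (a totality guard only).


-- ===== PORT A =====
-- dirs = [(dx, dy) for dx in (-1, 0, 1) for dy in (-1, 0, 1) if dx or dy]
def pvDirs : List (Int × Int) :=
  [(-1,-1), (-1,0), (-1,1), (0,-1), (0,1), (1,-1), (1,0), (1,1)]

def pvNeigh (c : Int × Int) : List (Int × Int) :=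
  pvDirs.map (fun d => (c.1 + d.1, c.2 + d.2))

-- tuple(p); inner lists have length 2 under Pre_ (A raises ValueError otherwise)
def pvToPair (p : List Int) : Int × Int :=
  match p with
  | [x, y] => (x, y)
  | _ => (0, 0)

-- grid = {tuple(p): 1 for p in stones}
def pvGridA (stones : List (List Int)) : PySem.Dict (Int × Int) Int :=
  stones.foldl (fun g p => g.insert (pvToPair p) 1) PySem.Dict.empty

-- sums = defaultdict(int); for c in grid: for q in neigh(c): if q not in grid: sums[q] += 1
def pvSumsA (grid : PySem.Dict (Int × Int) Int) : PySem.Dict (Int × Int) Int :=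
  grid.keys.foldl (fun s c =>
    (pvNeigh c).foldl (fun s q =>
      if grid.contains q then s else s.modify q 0 (· + 1)) s) PySem.Dict.empty

-- place(c, v, g, s)
def pvPlaceA (c : Int × Int) (v : Int) (g s : PySem.Dict (Int × Int) Int) :
    PySem.Dict (Int × Int) Int × PySem.Dict (Int × Int) Int :=
  let g1 := g.insert c v
  let s1 := s.erase c
  let s2 := (pvNeigh c).foldl (fun s q =>
    if g1.contains q then s else s.modify q 0 (· + v)) s1
  (g1, s2)

-- search(v, g, s); fuel bounds the recursion depth (totality guard only)
def pvSearchA (fuel : Nat) (v : Int) (g s : PySem.Dict (Int × Int) Int) : Int :=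
  match fuel with
  | 0 => v
  | fuel + 1 =>
    let cands := (s.items.filter (fun ct => ct.2 == v)).map Prod.fst
    if cands.isEmpty then v
    else (PySem.List.sorted2 cands Prod.fst Prod.snd).foldl
      (fun best c =>
        let gs := pvPlaceA c v g s
        max best (pvSearchA fuel (v + 1) gs.1 gs.2)) v

def first_impossible (stones : List (List Int)) : Int :=
  pvSearchA 1000000 2 (pvGridA stones) (pvSumsA (pvGridA stones))

-- ===== PORT B =====
-- (B shares dirs/neigh/pair helpers with A: identical in both Pythons)
-- nsum(g, q) = sum(g.get((x+dx, y+dy), 0) for dx, dy in dirs)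
def pvNsumB (g : PySem.Dict (Int × Int) Int) (q : Int × Int) : Int :=
  ((pvDirs.map (fun d => g.getD (q.1 + d.1, q.2 + d.2) 0))).sum

-- sorted(q for q in {neighbours of grid cells} if q not in g and nsum(g, q) == v)
def pvCandsB (g : PySem.Dict (Int × Int) Int) (v : Int) : List (Int × Int) :=
  PySem.List.sorted2
    ((PySem.Set.ofList (g.keys.flatMap pvNeigh)).filter
      (fun q => !g.contains q && pvNsumB g q == v))
    Prod.fst Prod.snd

-- search(v, g); fuel bounds the recursion depth (totality guard only)
def pvSearchB (fuel : Nat) (v : Int) (g : PySem.Dict (Int × Int) Int) : Int :=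
  match fuel with
  | 0 => v
  | fuel + 1 =>
    let cands := pvCandsB g v
    if cands.isEmpty then v
    else cands.foldl (fun best c => max best (pvSearchB fuel (v + 1) (g.insert c v))) v

def first_impossible_alt (stones : List (List Int)) : Int :=
  pvSearchB 1000000 2
    (stones.foldl (fun g p => g.insert (pvToPair p) 1) PySem.Dict.empty)

-- ===== PRECONDITION & SPEC =====
-- Pre_ excludes stones lists containing an inner list whose length is not 2: there A's
-- tuple unpacking 'x, y = c' raises ValueError (as does B's).
def Pre_first_impossible (stones : List (List Int)) : Prop :=
  ∀ p ∈ stones, p.length = 2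
instance (stones : List (List Int)) : Decidable (Pre_first_impossible stones) := by
  unfold Pre_first_impossible; infer_instance

def pvWitness_first_impossible : List (List Int) := [[0, 0], [0, 1]]

def Spec_first_impossible (stones : List (List Int)) (out : Int) : Prop := out = first_impossible_alt stones
instance (stones : List (List Int)) (out : Int) : Decidable (Spec_first_impossible stones out) := by unfold Spec_first_impossible; infer_instance

-- ===== CLAIM (what is proved, stated in full; the proofs are below) =====
def Claim_equal_first_impossible : Prop := ∀ (stones : List (List Int)), Dom_first_impossible stones → Pre_first_impossible stones → Spec_first_impossible stones (first_impossible stones)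

-- ===== LEMMAS AND PROOFS =====

-- direction/neighbourhood geometry and erase: lookup/membership/key-nodup facts (PySem has no erase lemmas)
theorem pvAux_any (l : List ((Int × Int) × Int)) (k q : Int × Int) (h : q ≠ k) :
    (l.filter (fun p => !p.1 == k)).any (fun p => p.1 == q) = l.any (fun p => p.1 == q) := by
  induction l with
  | nil => simp
  | cons p t ih =>
    by_cases hp : p.1 = k
    · subst hp
      have h2 : (p.1 == q) = false := by simpa using (Ne.symm h)
      simp [h2, ih]
    · have : (p.1 == k) = false := by simpa using hp
      simp [this, List.any_cons, ih]

theorem pvContains_erase (d : PySem.Dict (Int × Int) Int) (k q : Int × Int) :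
    (d.erase k).contains q = (!(q == k) && d.contains q) := by
  simp only [PySem.Dict.erase, PySem.Dict.contains]
  by_cases h : q = k
  · subst h; simp [List.any_filter]
  · have hb : (q == k) = false := by simpa using h
    simp only [hb, Bool.not_false, Bool.true_and]
    exact pvAux_any d.items k q h

theorem pvAux_find (l : List ((Int × Int) × Int)) (k q : Int × Int) (h : q ≠ k) :
    (l.filter (fun p => !p.1 == k)).find? (fun p => p.1 == q) = l.find? (fun p => p.1 == q) := by
  induction l with
  | nil => simp
  | cons p t ih =>
    by_cases hp : p.1 = k
    · subst hp
      have h2 : (p.1 == q) = false := by simpa using (Ne.symm h)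
      simp [h2, ih]
    · have hb : (p.1 == k) = false := by simpa using hp
      by_cases hq : p.1 = q
      · have h2 : (p.1 == q) = true := by simpa using hq
        simp [List.filter_cons, hb, h2]
      · have h2 : (p.1 == q) = false := by simpa using hq
        simp [List.filter_cons, hb, h2, ih]

theorem pvGetD_erase_of_ne (d : PySem.Dict (Int × Int) Int) (k q : Int × Int) (h : q ≠ k) :
    (d.erase k).getD q 0 = d.getD q 0 := by
  simp only [PySem.Dict.getD, PySem.Dict.get?, PySem.Dict.erase]
  rw [pvAux_find d.items k q h]

theorem pvNodup_keys_erase (d : PySem.Dict (Int × Int) Int) (k : Int × Int)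
    (h : d.keys.Nodup) : (d.erase k).keys.Nodup := by
  simp only [PySem.Dict.keys, PySem.Dict.erase] at *
  exact (List.Sublist.map _ List.filter_sublist).nodup h

theorem pvDirs_nodup : pvDirs.Nodup := by decide

theorem pvNeg_mem (d : Int × Int) (h : d ∈ pvDirs) : (-d.1, -d.2) ∈ pvDirs := by
  fin_cases h <;> decide

theorem pvMem_neigh (q c : Int × Int) :
    q ∈ pvNeigh c ↔ (q.1 - c.1, q.2 - c.2) ∈ pvDirs := by
  simp only [pvNeigh, List.mem_map]
  constructor
  · rintro ⟨d, hd, rfl⟩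
    simpa using hd
  · intro h
    exact ⟨(q.1 - c.1, q.2 - c.2), h, by simp⟩

theorem pvMem_neigh_symm (q c : Int × Int) : q ∈ pvNeigh c ↔ c ∈ pvNeigh q := by
  rw [pvMem_neigh, pvMem_neigh]
  constructor
  · intro h
    have := pvNeg_mem _ h
    simpa [neg_sub] using this
  · intro h
    have := pvNeg_mem _ h
    simpa [neg_sub] using this

theorem pvNeigh_nodup (c : Int × Int) : (pvNeigh c).Nodup := by
  refine List.Nodup.map ?_ pvDirs_nodup
  intro a b h
  have h1 := congrArg Prod.fst h
  have h2 := congrArg Prod.snd h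
  simp at h1 h2
  exact Prod.ext h1 h2

-- neighbour sums
theorem pvNsum_ne_exists (g : PySem.Dict (Int × Int) Int) (q : Int × Int)
    (h : pvNsumB g q ≠ 0) :
    ∃ d ∈ pvDirs, g.contains (q.1 + d.1, q.2 + d.2) = true := by
  by_contra hno
  push_neg at hno
  apply h
  apply List.sum_eq_zero
  intro x hx
  obtain ⟨d, hd, rfl⟩ := List.mem_map.mp hx
  exact PySem.Dict.getD_of_not_contains g 0 (by simpa using hno d hd)

theorem pvSumAux (ds : List (Int × Int)) (hnd : ds.Nodup) (g : PySem.Dict (Int × Int) Int)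
    (c : Int × Int) (w : Int) (q : Int × Int) (hc : g.contains c = false) :
    (ds.map (fun d => (g.insert c w).getD (q.1 + d.1, q.2 + d.2) 0)).sum
      = (ds.map (fun d => g.getD (q.1 + d.1, q.2 + d.2) 0)).sum
        + (if (c.1 - q.1, c.2 - q.2) ∈ ds then w else 0) := by
  induction ds with
  | nil => simp
  | cons d t ih =>
    rcases List.nodup_cons.mp hnd with ⟨hdt, hnt⟩
    by_cases hd : d = (c.1 - q.1, c.2 - q.2)
    · subst hd
      have hqc : (q.1 + (c.1 - q.1), q.2 + (c.2 - q.2)) = c := by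
        exact Prod.ext_iff.mpr ⟨by omega, by omega⟩
      have hmem : (c.1 - q.1, c.2 - q.2) ∉ t := hdt
      simp only [List.map_cons, List.sum_cons, hqc, PySem.Dict.getD_insert_self,
        ih hnt, PySem.Dict.getD_of_not_contains g 0 hc, List.mem_cons]
      simp [hmem]
      ring
    · have hne : (q.1 + d.1, q.2 + d.2) ≠ c := by
        intro hcontra
        have h1 : q.1 + d.1 = c.1 := congrArg Prod.fst hcontra
        have h2 : q.2 + d.2 = c.2 := congrArg Prod.snd hcontra
        exact hd (Prod.ext_iff.mpr ⟨by omega, by omega⟩)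
      simp only [List.map_cons, List.sum_cons,
        PySem.Dict.getD_insert_of_ne g w 0 hne, ih hnt, List.mem_cons]
      have : ((c.1 - q.1, c.2 - q.2) = d) = False := by
        simp [Ne.symm hd]
      simp [this]
      ring

theorem pvNsum_insert (g : PySem.Dict (Int × Int) Int) (c : Int × Int) (w : Int)
    (q : Int × Int) (hc : g.contains c = false) :
    pvNsumB (g.insert c w) q = pvNsumB g q + (if q ∈ pvNeigh c then w else 0) := by
  have h1 := pvSumAux pvDirs pvDirs_nodup g c w q hc
  have h2 : ((c.1 - q.1, c.2 - q.2) ∈ pvDirs) ↔ q ∈ pvNeigh c := by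
    rw [← pvMem_neigh c q, pvMem_neigh_symm]
  simp only [pvNsumB]
  rw [h1]
  by_cases hm : q ∈ pvNeigh c
  · rw [if_pos (h2.mpr hm), if_pos hm]
  · rw [if_neg (fun h => hm (h2.mp h)), if_neg hm]

-- the state invariant tying A's sums dict to B's recomputation
def pvInv (g s : PySem.Dict (Int × Int) Int) : Prop :=
  g.keys.Nodup ∧ s.keys.Nodup ∧
  (∀ c, g.contains c = true → 1 ≤ g.getD c 0) ∧
  (∀ q, s.contains q = true → g.contains q = false ∧ s.getD q 0 = pvNsumB g q) ∧
  (∀ q, g.contains q = false → pvNsumB g q ≠ 0 → s.contains q = true)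

-- the 'if q not in G: s[q] += w' loop, characterized
theorem pvUpsert_getD (G : PySem.Dict (Int × Int) Int) (w : Int) (L : List (Int × Int))
    (hnd : L.Nodup) : ∀ (s : PySem.Dict (Int × Int) Int) (q : Int × Int),
    (L.foldl (fun s q' => if G.contains q' then s else s.modify q' 0 (· + w)) s).getD q 0
      = s.getD q 0 + (if q ∈ L ∧ G.contains q = false then w else 0) := by
  induction L with
  | nil => intro s q; simp
  | cons a t ih =>
    intro s q
    rcases List.nodup_cons.mp hnd with ⟨hat, hnt⟩
    simp only [List.foldl_cons]
    by_cases hGa : G.contains a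
    · rw [if_pos hGa, ih hnt s q]
      by_cases hq : q = a
      · subst hq
        simp [hGa]
      · have : (q ∈ a :: t) ∧ G.contains q = false ↔ (q ∈ t) ∧ G.contains q = false := by
          simp [List.mem_cons, hq]
        by_cases h2 : q ∈ t ∧ G.contains q = false
        · rw [if_pos h2, if_pos (this.mpr h2)]
        · rw [if_neg h2, if_neg (fun h => h2 (this.mp h))]
    · rw [if_neg hGa, ih hnt _ q, PySem.Dict.getD_modify]
      by_cases hq : q = a
      · subst hq
        have hnot : ¬(q ∈ t ∧ G.contains q = false) := fun h => hat h.1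
        rw [if_pos rfl, if_neg hnot, if_pos ⟨List.mem_cons_self, by simpa using hGa⟩]
        ring
      · rw [if_neg hq]
        by_cases h2 : q ∈ t ∧ G.contains q = false
        · rw [if_pos h2, if_pos ⟨List.mem_cons_of_mem a h2.1, h2.2⟩]
        · have : ¬((q ∈ a :: t) ∧ G.contains q = false) := by
            intro h
            exact h2 ⟨(List.mem_cons.mp h.1).resolve_left hq, h.2⟩
          rw [if_neg h2, if_neg this]

theorem pvUpsert_contains (G : PySem.Dict (Int × Int) Int) (w : Int) (L : List (Int × Int)) :
    ∀ (s : PySem.Dict (Int × Int) Int) (q : Int × Int),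
    (L.foldl (fun s q' => if G.contains q' then s else s.modify q' 0 (· + w)) s).contains q
      = (s.contains q || (decide (q ∈ L) && !G.contains q)) := by
  induction L with
  | nil => intro s q; simp
  | cons a t ih =>
    intro s q
    simp only [List.foldl_cons]
    by_cases hGa : G.contains a
    · rw [if_pos hGa, ih s q]
      by_cases hq : q = a
      · subst hq; simp [hGa]
      · simp [List.mem_cons, hq]
    · rw [if_neg hGa, ih _ q, PySem.Dict.contains_modify]
      by_cases hq : q = a
      · subst hq
        simp [hGa]
      · have : (q == a) = false := by simpa using hq
        simp [this, List.mem_cons, hq]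

theorem pvUpsert_nodup (G : PySem.Dict (Int × Int) Int) (w : Int) (L : List (Int × Int)) :
    ∀ (s : PySem.Dict (Int × Int) Int), s.keys.Nodup →
    (L.foldl (fun s q' => if G.contains q' then s else s.modify q' 0 (· + w)) s).keys.Nodup := by
  induction L with
  | nil => intro s h; simpa
  | cons a t ih =>
    intro s h
    simp only [List.foldl_cons]
    by_cases hGa : G.contains a
    · rw [if_pos hGa]; exact ih s h
    · rw [if_neg hGa]
      exact ih _ (PySem.Dict.nodup_keys_insert _ _ _ h)

-- Python's tuple sort = sort by the lexicographic key
theorem pvSorted2_eq_sorted (xs : List (Int × Int)) :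
    PySem.List.sorted2 xs Prod.fst Prod.snd
      = PySem.List.sorted xs (fun x => toLex x) false := by
  rw [PySem.List.sorted_eq_foldl_insertBy]
  unfold PySem.List.sorted2
  have hfun : (fun (a b : Int × Int) =>
        (decide (a.1 < b.1) || (!decide (b.1 < a.1) && decide (a.2 < b.2))))
      = (fun (a b : Int × Int) => decide (toLex a < toLex b)) := by
    funext a b
    rcases lt_trichotomy a.1 b.1 with h | h | h
    · simp [Prod.Lex.lt_iff, h]
    · simp [Prod.Lex.lt_iff, h, lt_irrefl]
    · simp [Prod.Lex.lt_iff, h, not_lt.mpr (le_of_lt h), h.ne']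
  simp only [if_neg (by decide : ¬(false = true))]
  rw [hfun]

theorem pvSorted2_eq_of_perm (xs ys : List (Int × Int)) (h : xs.Perm ys) :
    PySem.List.sorted2 xs Prod.fst Prod.snd = PySem.List.sorted2 ys Prod.fst Prod.snd := by
  rw [pvSorted2_eq_sorted, pvSorted2_eq_sorted]
  exact PySem.List.sorted_eq_sorted_of_perm xs ys _ toLex.injective h

-- candidate sets
theorem pvMem_candsA (s : PySem.Dict (Int × Int) Int) (v : Int) (hnd : s.keys.Nodup)
    (q : Int × Int) :
    q ∈ (s.items.filter (fun ct => ct.2 == v)).map Prod.fst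
      ↔ s.contains q = true ∧ s.getD q 0 = v := by
  constructor
  · intro h
    obtain ⟨⟨q', t⟩, hmem, rfl⟩ := List.mem_map.mp h
    rcases List.mem_filter.mp hmem with ⟨hit, hv⟩
    have ht : t = v := by simpa using hv
    subst ht
    have hget : s.get? q' = some t := (PySem.Dict.get?_eq_some_iff_mem_items s q' t hnd).mpr hit
    refine ⟨?_, ?_⟩
    · rw [PySem.Dict.contains_eq_isSome_get?, hget]; rfl
    · simp [PySem.Dict.getD, hget]
  · rintro ⟨hc, hd⟩
    have hsome : (s.get? q).isSome := by rw [← PySem.Dict.contains_eq_isSome_get?]; exact hc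
    obtain ⟨t, ht⟩ := Option.isSome_iff_exists.mp hsome
    have htv : t = v := by
      have := hd
      simp [PySem.Dict.getD, ht] at this
      exact this
    subst htv
    refine List.mem_map.mpr ⟨(q, t), List.mem_filter.mpr ⟨?_, by simp⟩, rfl⟩
    exact (PySem.Dict.get?_eq_some_iff_mem_items s q t hnd).mp ht

theorem pvNodup_candsA (s : PySem.Dict (Int × Int) Int) (v : Int) (hnd : s.keys.Nodup) :
    ((s.items.filter (fun ct => ct.2 == v)).map Prod.fst).Nodup := by
  have hsub : ((s.items.filter (fun ct => ct.2 == v)).map Prod.fst).Sublist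
      (s.items.map Prod.fst) := List.Sublist.map _ List.filter_sublist
  exact hsub.nodup hnd

theorem pvMem_candsB (g : PySem.Dict (Int × Int) Int) (v : Int) (q : Int × Int) :
    q ∈ (PySem.Set.ofList (g.keys.flatMap pvNeigh)).filter
        (fun q => !g.contains q && pvNsumB g q == v)
      ↔ (∃ c ∈ g.keys, q ∈ pvNeigh c) ∧ g.contains q = false ∧ pvNsumB g q = v := by
  rw [List.mem_filter]
  rw [PySem.Set.mem_ofList]
  simp [List.mem_flatMap]

-- under the invariant the two candidate computations agree
theorem pvCands_eq (g s : PySem.Dict (Int × Int) Int) (v : Int) (hInv : pvInv g s)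
    (hv : 1 ≤ v) :
    PySem.List.sorted2 ((s.items.filter (fun ct => ct.2 == v)).map Prod.fst)
      Prod.fst Prod.snd = pvCandsB g v := by
  obtain ⟨h1, h2, h3, h4, h5⟩ := hInv
  unfold pvCandsB
  apply pvSorted2_eq_of_perm
  apply (List.perm_ext_iff_of_nodup (pvNodup_candsA s v h2)
    ((PySem.Set.nodup_ofList _).filter _)).mpr
  intro q
  rw [pvMem_candsA s v h2 q, pvMem_candsB g v q]
  constructor
  · rintro ⟨hc, hd⟩
    obtain ⟨hgq, hnsum⟩ := h4 q hc
    rw [hd] at hnsum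
    refine ⟨?_, hgq, hnsum.symm⟩
    obtain ⟨d, hdm, hcont⟩ := pvNsum_ne_exists g q (by omega)
    refine ⟨(q.1 + d.1, q.2 + d.2), (PySem.Dict.contains_iff_mem_keys _ _).mp hcont, ?_⟩
    rw [pvMem_neigh_symm]
    rw [pvMem_neigh]
    simpa using hdm
  · rintro ⟨_, hgq, hnsum⟩
    have hc : s.contains q = true := h5 q hgq (by omega)
    obtain ⟨_, hd⟩ := h4 q hc
    exact ⟨hc, by rw [hd, hnsum]⟩

-- placing a candidate stone preserves the invariant
theorem pvInv_place (g s : PySem.Dict (Int × Int) Int) (hInv : pvInv g s)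
    (c : Int × Int) (v : Int) (hv : 1 ≤ v)
    (hc : s.contains c = true) (hval : s.getD c 0 = v) :
    pvInv (g.insert c v) (pvPlaceA c v g s).2 := by
  obtain ⟨h1, h2, h3, h4, h5⟩ := hInv
  obtain ⟨hgc, _⟩ := h4 c hc
  have hs2 : (pvPlaceA c v g s).2
      = (pvNeigh c).foldl
          (fun s q' => if (g.insert c v).contains q' then s else s.modify q' 0 (· + v))
          (s.erase c) := rfl
  rw [hs2]
  have hGc : (g.insert c v).contains c = true := by
    rw [PySem.Dict.contains_insert]; simp
  have hG : ∀ q : Int × Int, q ≠ c → (g.insert c v).contains q = g.contains q := by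
    intro q hq
    rw [PySem.Dict.contains_insert]
    simp [hq]
  refine ⟨PySem.Dict.nodup_keys_insert _ _ _ h1,
    pvUpsert_nodup _ _ _ _ (pvNodup_keys_erase s c h2), ?_, ?_, ?_⟩
  · -- values positive
    intro q hq
    by_cases hqc : q = c
    · subst hqc; rw [PySem.Dict.getD_insert_self]; exact hv
    · rw [PySem.Dict.getD_insert_of_ne g v 0 hqc]
      exact h3 q (by rw [← hG q hqc]; exact hq)
  · -- sums entries are exactly neighbour sums
    intro q hq
    rw [pvUpsert_contains] at hq
    by_cases hqc : q = c
    · subst hqc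
      exfalso
      have he : (s.erase q).contains q = false := by
        rw [pvContains_erase]; simp
      rw [he, hGc] at hq
      simp at hq
    · have he : (s.erase c).contains q = s.contains q := by
        rw [pvContains_erase]; simp [hqc]
      have heD : (s.erase c).getD q 0 = s.getD q 0 := pvGetD_erase_of_ne s c q hqc
      rw [he, hG q hqc] at hq
      rw [pvUpsert_getD _ _ _ (pvNeigh_nodup c), heD, hG q hqc,
        pvNsum_insert g c v q hgc]
      by_cases hqn : q ∈ pvNeigh c
      · -- q is a neighbour of c
        rcases Bool.or_eq_true_iff.mp hq with hsq | hrest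
        · obtain ⟨hgq, hsum⟩ := h4 q hsq
          rw [if_pos ⟨hqn, hgq⟩, if_pos hqn, hsum]
          exact ⟨hgq, rfl⟩
        · have hgq : g.contains q = false := by
            rcases Bool.and_eq_true_iff.mp hrest with ⟨_, h⟩
            simpa using h
          by_cases hsq : s.contains q = true
          · obtain ⟨_, hsum⟩ := h4 q hsq
            rw [if_pos ⟨hqn, hgq⟩, if_pos hqn, hsum]
            exact ⟨hgq, rfl⟩
          · have hs0 : s.getD q 0 = 0 :=
              PySem.Dict.getD_of_not_contains s 0 (by simpa using hsq)
            have hn0 : pvNsumB g q = 0 := by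
              by_contra hne
              exact hsq (h5 q hgq hne)
            rw [if_pos ⟨hqn, hgq⟩, if_pos hqn, hs0, hn0]
            exact ⟨hgq, rfl⟩
      · -- q is not a neighbour of c: nothing changed
        have hnot : ¬(q ∈ pvNeigh c ∧ g.contains q = false) := fun h => hqn h.1
        rw [if_neg hnot, if_neg hqn]
        have hsq : s.contains q = true := by
          rcases Bool.or_eq_true_iff.mp hq with hsq | hrest
          · exact hsq
          · exfalso
            rcases Bool.and_eq_true_iff.mp hrest with ⟨hm, _⟩
            exact hqn (by simpa using hm)
        obtain ⟨hgq, hsum⟩ := h4 q hsq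
        rw [hsum]
        simp [hgq]
  · -- completeness: nonzero sums are tracked
    intro q hgq hnsum
    by_cases hqc : q = c
    · subst hqc; rw [hGc] at hgq; cases hgq
    · rw [hG q hqc] at hgq
      rw [pvNsum_insert g c v q hgc] at hnsum
      rw [pvUpsert_contains]
      have he : (s.erase c).contains q = s.contains q := by
        rw [pvContains_erase]; simp [hqc]
      rw [he, hG q hqc]
      by_cases hqn : q ∈ pvNeigh c
      · simp [hqn, hgq]
      · rw [if_neg hqn, add_zero] at hnsum
        simp [h5 q hgq hnsum]

theorem pvMain : ∀ (fuel : Nat) (v : Int) (g s : PySem.Dict (Int × Int) Int),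
    pvInv g s → 1 ≤ v → pvSearchA fuel v g s = pvSearchB fuel v g := by
  intro fuel
  induction fuel with
  | zero => intro v g s _ _; rfl
  | succ n ih =>
    intro v g s hInv hv
    have hcands := pvCands_eq g s v hInv hv
    show (if ((s.items.filter (fun ct => ct.2 == v)).map Prod.fst).isEmpty then v
      else (PySem.List.sorted2 ((s.items.filter (fun ct => ct.2 == v)).map Prod.fst)
          Prod.fst Prod.snd).foldl
        (fun best c =>
          let gs := pvPlaceA c v g s
          max best (pvSearchA n (v + 1) gs.1 gs.2)) v)
      = (if (pvCandsB g v).isEmpty then v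
        else (pvCandsB g v).foldl
          (fun best c => max best (pvSearchB n (v + 1) (g.insert c v))) v)
    have hemp : ((s.items.filter (fun ct => ct.2 == v)).map Prod.fst).isEmpty
        = (PySem.List.sorted2 ((s.items.filter (fun ct => ct.2 == v)).map Prod.fst)
            Prod.fst Prod.snd).isEmpty := by
      have hperm := PySem.List.sorted2_perm
        ((s.items.filter (fun ct => ct.2 == v)).map Prod.fst) Prod.fst Prod.snd false
      by_cases h : ((s.items.filter (fun ct => ct.2 == v)).map Prod.fst) = []
      · rw [h] at hperm ⊢
        rw [hperm.eq_nil]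
      · have h2 : PySem.List.sorted2 ((s.items.filter (fun ct => ct.2 == v)).map Prod.fst)
            Prod.fst Prod.snd ≠ [] := by
          intro hn
          rw [hn] at hperm
          exact h (hperm.symm.eq_nil)
        have e1 : ((s.items.filter (fun ct => ct.2 == v)).map Prod.fst).isEmpty = false := by
          simpa using h
        have e2 : (PySem.List.sorted2 ((s.items.filter (fun ct => ct.2 == v)).map Prod.fst)
            Prod.fst Prod.snd).isEmpty = false := by
          simpa using h2
        rw [e1, e2]
    rw [← hcands, ← hemp]
    by_cases he : ((s.items.filter (fun ct => ct.2 == v)).map Prod.fst).isEmpty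
    · rw [if_pos he, if_pos he]
    · rw [if_neg he, if_neg he]
      apply PySem.List.foldl_congr_mem
      intro acc c hcmem
      have hcLA : c ∈ (s.items.filter (fun ct => ct.2 == v)).map Prod.fst :=
        (PySem.List.sorted2_perm _ _ _ _).mem_iff.mp hcmem
      obtain ⟨hcont, hgetd⟩ := (pvMem_candsA s v hInv.2.1 c).mp hcLA
      have hplace := pvInv_place g s hInv c v (by omega) hcont hgetd
      have h1 : (pvPlaceA c v g s).1 = g.insert c v := rfl
      simp only [h1]
      rw [ih (v + 1) (g.insert c v) (pvPlaceA c v g s).2 hplace (by omega)]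

theorem pvGrid_vals (stones : List (List Int)) :
    ∀ (d : PySem.Dict (Int × Int) Int),
      (∀ c, d.contains c = true → d.getD c 0 = 1) →
      ∀ c, (stones.foldl (fun g p => g.insert (pvToPair p) 1) d).contains c = true →
        (stones.foldl (fun g p => g.insert (pvToPair p) 1) d).getD c 0 = 1 := by
  induction stones with
  | nil => intro d h c; simpa using h c
  | cons p t ih =>
    intro d h c
    simp only [List.foldl_cons]
    apply ih
    intro c' hc'
    by_cases hq : c' = pvToPair p
    · subst hq; rw [PySem.Dict.getD_insert_self]
    · rw [PySem.Dict.getD_insert_of_ne d 1 0 hq]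
      apply h
      rw [PySem.Dict.contains_insert] at hc'
      simpa [hq] using hc'

theorem pvGrid_nodup (stones : List (List Int)) : (pvGridA stones).keys.Nodup :=
  PySem.Dict.nodup_keys_foldl_insert_key stones pvToPair (fun _ _ => 1) _
    PySem.Dict.nodup_keys_empty

theorem pvCount_swap (l1 l2 : List (Int × Int)) (h1 : l1.Nodup) (h2 : l2.Nodup) :
    l1.countP (fun x => decide (x ∈ l2)) = l2.countP (fun x => decide (x ∈ l1)) := by
  rw [List.countP_eq_length_filter, List.countP_eq_length_filter]
  apply List.Perm.length_eq
  apply (List.perm_ext_iff_of_nodup (h1.filter _) (h2.filter _)).mpr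
  intro a
  simp [List.mem_filter, and_comm]

theorem pvNsum_eq_count (g : PySem.Dict (Int × Int) Int)
    (hval : ∀ c, g.contains c = true → g.getD c 0 = 1) (hnd : g.keys.Nodup)
    (q : Int × Int) :
    pvNsumB g q = (g.keys.countP (fun c => decide (q ∈ pvNeigh c)) : Int) := by
  have hmap : pvNsumB g q = ((pvNeigh q).map (fun c => g.getD c 0)).sum := by
    unfold pvNsumB pvNeigh
    rw [List.map_map]
    rfl
  rw [hmap]
  have hcong : ∀ c ∈ pvNeigh q, g.getD c 0
      = if g.contains c = true then (1 : Int) else 0 := by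
    intro c _
    by_cases hc : g.contains c = true
    · rw [if_pos hc]; exact hval c hc
    · rw [if_neg hc]
      exact PySem.Dict.getD_of_not_contains g 0 (by simpa using hc)
  rw [List.map_congr_left hcong, PySem.List.sum_map_ite_one_zero]
  congr 1
  have hc2 : ∀ c ∈ pvNeigh q, ((g.contains c) = true ↔ decide (c ∈ g.keys) = true) := by
    intro c _
    simp [PySem.Dict.contains_iff_mem_keys]
  rw [List.countP_congr hc2]
  rw [pvCount_swap (pvNeigh q) g.keys (pvNeigh_nodup q) hnd]
  apply List.countP_congr
  intro c _
  simp [pvMem_neigh_symm]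

theorem pvSumsFold_getD (G : PySem.Dict (Int × Int) Int) :
    ∀ (K : List (Int × Int)) (s : PySem.Dict (Int × Int) Int) (q : Int × Int),
    ((K.foldl (fun s c => (pvNeigh c).foldl
        (fun s q' => if G.contains q' then s else s.modify q' 0 (· + 1)) s) s).getD q 0)
      = s.getD q 0 + (if G.contains q = false
          then ((K.countP (fun c => decide (q ∈ pvNeigh c)) : Nat) : Int) else 0) := by
  intro K
  induction K with
  | nil => intro s q; simp
  | cons a t ih =>
    intro s q
    simp only [List.foldl_cons]
    rw [ih, pvUpsert_getD G 1 (pvNeigh a) (pvNeigh_nodup a) s q, List.countP_cons]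
    by_cases hGq : G.contains q = false
    · by_cases hqa : q ∈ pvNeigh a
      · rw [if_pos ⟨hqa, hGq⟩, if_pos hGq, if_pos hGq]
        simp [hqa]
        push_cast
        ring
      · rw [if_neg (fun h => hqa h.1), if_pos hGq, if_pos hGq]
        simp [hqa]
    · rw [if_neg (fun h => hGq h.2), if_neg hGq, if_neg hGq]
      ring

theorem pvSumsFold_contains (G : PySem.Dict (Int × Int) Int) :
    ∀ (K : List (Int × Int)) (s : PySem.Dict (Int × Int) Int) (q : Int × Int),
    ((K.foldl (fun s c => (pvNeigh c).foldl
        (fun s q' => if G.contains q' then s else s.modify q' 0 (· + 1)) s) s).contains q)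
      = (s.contains q || (decide (∃ c ∈ K, q ∈ pvNeigh c) && !G.contains q)) := by
  intro K
  induction K with
  | nil => intro s q; simp
  | cons a t ih =>
    intro s q
    simp only [List.foldl_cons]
    rw [ih, pvUpsert_contains G 1 (pvNeigh a) s q]
    by_cases hqa : q ∈ pvNeigh a <;> by_cases hG : G.contains q <;>
      by_cases hex : ∃ c ∈ t, q ∈ pvNeigh c <;>
      simp [hqa, hG, hex]

theorem pvSumsFold_nodup (G : PySem.Dict (Int × Int) Int) (K : List (Int × Int)) :
    ∀ (s : PySem.Dict (Int × Int) Int), s.keys.Nodup →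
    ((K.foldl (fun s c => (pvNeigh c).foldl
        (fun s q' => if G.contains q' then s else s.modify q' 0 (· + 1)) s) s).keys.Nodup) := by
  induction K with
  | nil => intro s h; simpa
  | cons a t ih =>
    intro s h
    simp only [List.foldl_cons]
    exact ih _ (pvUpsert_nodup G 1 (pvNeigh a) s h)

theorem pvInvInit (stones : List (List Int)) :
    pvInv (pvGridA stones) (pvSumsA (pvGridA stones)) := by
  have hval : ∀ c, (pvGridA stones).contains c = true → (pvGridA stones).getD c 0 = 1 := by
    apply pvGrid_vals stones PySem.Dict.empty
    intro c hc
    rw [PySem.Dict.contains_empty] at hc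
    cases hc
  have hnd := pvGrid_nodup stones
  have hsums : pvSumsA (pvGridA stones)
      = (pvGridA stones).keys.foldl (fun s c => (pvNeigh c).foldl
          (fun s q' => if (pvGridA stones).contains q' then s
            else s.modify q' 0 (· + 1)) s) PySem.Dict.empty := rfl
  refine ⟨hnd, ?_, ?_, ?_, ?_⟩
  · rw [hsums]
    exact pvSumsFold_nodup _ _ _ PySem.Dict.nodup_keys_empty
  · intro c hc
    rw [hval c hc]
  · intro q hq
    rw [hsums, pvSumsFold_contains] at hq
    rw [PySem.Dict.contains_empty, Bool.false_or, Bool.and_eq_true] at hq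
    obtain ⟨hex, hGq⟩ := hq
    have hGq' : (pvGridA stones).contains q = false := by simpa using hGq
    refine ⟨hGq', ?_⟩
    rw [hsums, pvSumsFold_getD, PySem.Dict.getD_empty, if_pos hGq', zero_add,
      pvNsum_eq_count (pvGridA stones) hval hnd q]
  · intro q hGq hnsum
    rw [hsums, pvSumsFold_contains, PySem.Dict.contains_empty, Bool.false_or]
    rw [pvNsum_eq_count (pvGridA stones) hval hnd q] at hnsum
    have hne0 : (pvGridA stones).keys.countP (fun c => decide (q ∈ pvNeigh c)) ≠ 0 := by
      intro h0
      apply hnsum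
      rw [h0]
      simp
    have hex : ∃ c ∈ (pvGridA stones).keys, q ∈ pvNeigh c := by
      by_contra hno
      push_neg at hno
      exact hne0 (List.countP_eq_zero.mpr (fun a ha => by simpa using hno a ha))
    simp [hex, hGq]

-- ===== VERDICT (by name: the statement is the Claim_ definition above) =====
theorem first_impossible_spec : Claim_equal_first_impossible := by
  intro stones _ _
  unfold Spec_first_impossible first_impossible first_impossible_alt
  have hg : (stones.foldl (fun g p => g.insert (pvToPair p) 1) PySem.Dict.empty) = pvGridA stones := rfl
  rw [hg]
  exact pvMain 1000000 2 _ _ (pvInvInit stones) (by omega)
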